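-- pv_equiv track=rewrite | github.com/Kurailight/The-Luhn-Algorithm | Algorytm Luhna.py | przypisanie_wagi
-- ===== SOURCE A (Python) =====
-- def przypisanie_wagi(pierwotny_numer):
--     for i in range(len(pierwotny_numer)-1,-1,-2):
--         pierwotny_numer[i]=pierwotny_numer[i]*1
--         if pierwotny_numer[i]>9:
--             pierwotny_numer[i]= sum(int(cyfra) for cyfra in str(pierwotny_numer[i]))
--
--     for i in range(len(pierwotny_numer)-2,-1,-2):
--         pierwotny_numer[i]=pierwotny_numer[i]*2
--         if pierwotny_numer[i]>9:
--             pierwotny_numer[i]= sum(int(cyfra) for cyfra in str(pierwotny_numer[i]))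
--
--     numer_przemnozony=list(pierwotny_numer.copy())
--     return numer_przemnozony
-- ===== SOURCE B (Python) =====
-- def przypisanie_wagi(pierwotny_numer):
--     n = len(pierwotny_numer)
--     wynik = []
--     for i, v in enumerate(pierwotny_numer):
--         if (n - 1 - i) % 2 == 1:
--             v = v * 2
--         if v > 9:
--             s = 0
--             while v:
--                 s += v % 10
--                 v //= 10
--             v = s
--         wynik.append(v)
--     pierwotny_numer[:] = wynik   # same in-place mutation of the argument as A
--     return wynik
-- ===== Notes on version B (the rewrite author's own statement) =====
-- stated objective: alternative
-- what changed: Replaces A's two separate in-place index-stepping passes (range(len-1,-1,-2) then range(len-2,-1,-2)) by one forward enumerate pass that picks the multiplier from the offset parity, and replaces A's str()/int() round-trip digit sum by an arithmetic divmod loop.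
import Mathlib
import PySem

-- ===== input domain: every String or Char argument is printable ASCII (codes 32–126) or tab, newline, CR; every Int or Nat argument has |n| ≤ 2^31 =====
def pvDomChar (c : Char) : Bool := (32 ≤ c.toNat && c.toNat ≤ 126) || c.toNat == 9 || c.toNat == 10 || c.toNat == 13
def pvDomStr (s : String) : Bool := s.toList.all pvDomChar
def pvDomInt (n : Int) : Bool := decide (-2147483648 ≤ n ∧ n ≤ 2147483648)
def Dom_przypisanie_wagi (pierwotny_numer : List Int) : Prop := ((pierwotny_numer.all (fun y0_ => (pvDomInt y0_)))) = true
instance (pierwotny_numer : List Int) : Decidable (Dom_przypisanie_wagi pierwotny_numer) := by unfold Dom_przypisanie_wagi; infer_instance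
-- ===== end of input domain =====

-- B replaces A's two index-stepping in-place passes (odd offsets, then even offsets) by ONE
-- enumerate pass choosing the multiplier from the index parity, with an arithmetic digit-sum
-- loop instead of A's str() round-trip; equivalence is about the RETURN value (in Python, B
-- performs the same in-place mutation of the argument as A).

-- ===== PORT A =====
-- sum(int(cyfra) for cyfra in str(v)); only reached with v > 9, where every character of
-- str(v) is a digit, so int(cyfra) never raises and the `.getD 0` default is never taken.
def pvStrDigitSum (v : Int) : Int :=
  ((PySem.Int.toChars v).map (fun c => (PySem.Int.ofChars? [c]).getD 0)).sum

-- the two for-loops over range(len-1,-1,-2) / range(len-2,-1,-2), mutating the list at index i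
-- (the store `x[i] = x[i]*c` followed by the conditional overwrite is one pySetD of the final value)
def przypisanie_wagi (pierwotny_numer : List Int) : List Int :=
  let l1 := (PySem.List.pyRange (PySem.List.len pierwotny_numer - 1) (-1) (-2)).foldl
    (fun l i =>
      PySem.List.pySetD l i
        (let v := PySem.List.pyGetD l i 0 * 1
         if v > 9 then pvStrDigitSum v else v)) pierwotny_numer
  let l2 := (PySem.List.pyRange (PySem.List.len l1 - 2) (-1) (-2)).foldl
    (fun l i =>
      PySem.List.pySetD l i
        (let v := PySem.List.pyGetD l i 0 * 2
         if v > 9 then pvStrDigitSum v else v)) l1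
  l2

-- ===== PORT B =====
-- the `while v: s += v % 10; v //= 10` loop of Source B (v is a positive int there)
def pvDigitLoop (v : Nat) (s : Int) : Int :=
  if h : v = 0 then s else pvDigitLoop (v / 10) (s + ((v % 10 : Nat) : Int))
termination_by v
decreasing_by exact Nat.div_lt_self (Nat.pos_of_ne_zero h) (by norm_num)

def przypisanie_wagi_alt (pierwotny_numer : List Int) : List Int :=
  let n : Int := (pierwotny_numer.length : Int)
  (PySem.List.enumerate pierwotny_numer).map (fun p =>
    let v := if PySem.Int.mod (n - 1 - p.1) 2 == 1 then p.2 * 2 else p.2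
    if v > 9 then pvDigitLoop v.toNat 0 else v)

-- ===== PRECONDITION & SPEC =====
def Spec_przypisanie_wagi (pierwotny_numer : List Int) (out : List Int) : Prop := out = przypisanie_wagi_alt pierwotny_numer
instance (pierwotny_numer : List Int) (out : List Int) : Decidable (Spec_przypisanie_wagi pierwotny_numer out) := by unfold Spec_przypisanie_wagi; infer_instance

-- ===== CLAIM (what is proved, stated in full; the proofs are below) =====
def Claim_equal_przypisanie_wagi : Prop := ∀ (pierwotny_numer : List Int), Dom_przypisanie_wagi pierwotny_numer → Spec_przypisanie_wagi pierwotny_numer (przypisanie_wagi pierwotny_numer)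

-- ===== LEMMAS AND PROOFS =====

-- int(c) of the digit character of d (d < 10) is d
lemma pvOfChars_digitChar (d : Nat) (hd : d < 10) :
    (PySem.Int.ofChars? [Nat.digitChar d]).getD 0 = (d : Int) := by
  interval_cases d <;> decide

def pvCSum (cs : List Char) : Int := (cs.map (fun c => (PySem.Int.ofChars? [c]).getD 0)).sum

lemma pvCSum_toDigitsCore (f : Nat) : ∀ (n : Nat) (acc : List Char), n < 10 ^ f →
    pvCSum (Nat.toDigitsCore 10 f n acc) = ((Nat.digits 10 n).sum : Int) + pvCSum acc := by
  induction f with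
  | zero =>
    intro n acc h
    interval_cases n
    simp [Nat.toDigitsCore]
  | succ f ih =>
    intro n acc h
    rw [Nat.toDigitsCore]
    by_cases h0 : n / 10 = 0
    · simp only [h0, pvCSum]
      by_cases hn : n = 0
      · simp [hn]
        decide
      · rw [Nat.digits_def' (by norm_num) (Nat.pos_of_ne_zero hn), h0]
        simp [pvCSum]
        rw [pvOfChars_digitChar (n % 10) (Nat.mod_lt _ (by norm_num))]
        omega
    · rw [if_neg h0, ih (n / 10) _ (by
        have : n < 10 ^ f * 10 := by rw [← pow_succ]; exact h
        exact Nat.div_lt_of_lt_mul (by omega))]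
      have hn : 0 < n := by omega
      rw [Nat.digits_def' (by norm_num) hn]
      simp only [pvCSum, List.map_cons, List.sum_cons,
        pvOfChars_digitChar (n % 10) (Nat.mod_lt _ (by norm_num))]
      push_cast
      ring

lemma pvDigitLoop_eq (n : Nat) : ∀ (s : Int), pvDigitLoop n s = s + ((Nat.digits 10 n).sum : Int) := by
  induction n using Nat.strong_induction_on with
  | _ n ih =>
    intro s
    rw [pvDigitLoop]
    by_cases hn : n = 0
    · simp [hn]
    · rw [dif_neg hn, ih (n / 10) (Nat.div_lt_self (Nat.pos_of_ne_zero hn) (by norm_num)),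
        Nat.digits_def' (b := 10) (by norm_num) (Nat.pos_of_ne_zero hn)]
      simp only [List.map_cons, List.sum_cons]
      push_cast
      ring

lemma pvStrDigitSum_eq (v : Int) (hv : 9 < v) : pvStrDigitSum v = pvDigitLoop v.toNat 0 := by
  have hts : PySem.Int.toChars v = Nat.toDigits 10 v.toNat := by
    simp [PySem.Int.toChars, if_neg (by omega : ¬ v < 0)]
  have hb : v.toNat < 10 ^ (v.toNat + 1) :=
    lt_of_lt_of_le (Nat.lt_pow_self (by norm_num)) (Nat.pow_le_pow_right (by norm_num) (by omega))
  show pvCSum (PySem.Int.toChars v) = pvDigitLoop v.toNat 0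
  rw [hts, Nat.toDigits, pvCSum_toDigitsCore (v.toNat + 1) v.toNat [] hb, pvDigitLoop_eq]
  simp [pvCSum]

-- a fold of in-place updates `l[i] = upd(l[i])` over distinct in-range indices acts pointwise
lemma pvFoldSet (upd : Int → Int) (F : List Int → Int → List Int)
    (hF : ∀ l i, F l i = PySem.List.pySetD l i (upd (PySem.List.pyGetD l i 0))) :
    ∀ (R : List Int) (xs : List Int),
    (∀ i ∈ R, 0 ≤ i ∧ i < (xs.length : Int)) → R.Nodup →
    (R.foldl F xs).length = xs.length ∧
      ∀ (j : Nat) (hj : j < xs.length),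
        (R.foldl F xs)[j]? = some (if (j : Int) ∈ R then upd xs[j] else xs[j]) := by
  intro R
  induction R with
  | nil => intro xs _ _; exact ⟨rfl, fun j hj => by simp [List.getElem?_eq_getElem hj]⟩
  | cons i R ih =>
    intro xs hb hnd
    obtain ⟨hi0, hilt⟩ := hb i (List.mem_cons_self ..)
    have hstep : F xs i = xs.set i.toNat (upd (xs[i.toNat]'(by omega))) := by
      rw [hF, PySem.List.pySetD_of_nonneg xs _ hi0,
        PySem.List.pyGetD_eq_getElem xs 0 hi0 hilt]
    have hlen : (F xs i).length = xs.length := by rw [hstep]; simp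
    have hb' : ∀ k ∈ R, 0 ≤ k ∧ k < ((F xs i).length : Int) := by
      intro k hk; rw [hlen]; exact hb k (List.mem_cons_of_mem _ hk)
    obtain ⟨hl, hp⟩ := ih (F xs i) hb' hnd.of_cons
    have hiR : i ∉ R := (List.nodup_cons.mp hnd).1
    refine ⟨by rw [List.foldl_cons, hl, hlen], ?_⟩
    intro j hj
    rw [List.foldl_cons, hp j (by omega)]
    simp only [hstep, List.getElem_set, List.mem_cons]
    by_cases hji : (j : Int) = i
    · have hji' : j = i.toNat := by omega
      subst hji'
      have hc : ((i.toNat : Nat) : Int) = i := by omega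
      rw [hc, if_neg hiR, if_pos rfl, if_pos (Or.inl rfl)]
    · have hne : ¬ i.toNat = j := by omega
      simp only [if_neg hne]
      by_cases hjR : (j : Int) ∈ R
      · rw [if_pos hjR, if_pos (Or.inr hjR)]
      · rw [if_neg hjR, if_neg (by tauto)]

-- list(range(a, -1, -2)): exactly the k with 0 ≤ k ≤ a of a's parity
lemma pvMemRange (a i : Int) :
    i ∈ PySem.List.pyRange a (-1) (-2) ↔ 0 ≤ i ∧ i ≤ a ∧ (a - i) % 2 = 0 := by
  unfold PySem.List.pyRange
  rw [if_neg (by norm_num)]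
  by_cases ha : (-1 : Int) < a
  · rw [if_neg (by norm_num), if_pos ha]
    simp only [List.mem_map, List.mem_range]
    norm_num
    constructor
    · rintro ⟨k, hk, rfl⟩; omega
    · rintro ⟨h0, h1, h2⟩
      exact ⟨((a - i) / 2).toNat, by omega, by omega⟩
  · rw [if_neg (by norm_num), if_neg ha]
    simp only [List.range_zero, List.map_nil, List.not_mem_nil, false_iff]
    omega

lemma pvNodupRange (a : Int) : (PySem.List.pyRange a (-1) (-2)).Nodup := by
  unfold PySem.List.pyRange
  rw [if_neg (by norm_num)]
  refine List.Nodup.map ?_ (List.nodup_range)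
  intro x y h
  dsimp only at h
  omega

-- ===== VERDICT (by name: the statement is the Claim_ definition above) =====
theorem przypisanie_wagi_spec : Claim_equal_przypisanie_wagi := by
  intro xs _
  show przypisanie_wagi xs = przypisanie_wagi_alt xs
  unfold przypisanie_wagi przypisanie_wagi_alt
  set n : Int := (xs.length : Int) with hn
  set upd1 : Int → Int := fun v0 =>
    (let v := v0 * 1; if v > 9 then pvStrDigitSum v else v) with hupd1
  set upd2 : Int → Int := fun v0 =>
    (let v := v0 * 2; if v > 9 then pvStrDigitSum v else v) with hupd2
  obtain ⟨hl1, hp1⟩ := pvFoldSet upd1 _ (fun l i => rfl)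
    (PySem.List.pyRange (PySem.List.len xs - 1) (-1) (-2)) xs
    (by intro i hi; rw [PySem.List.len_eq] at hi; rw [(pvMemRange _ _)] at hi; omega)
    (pvNodupRange _)
  set l1 := (PySem.List.pyRange (PySem.List.len xs - 1) (-1) (-2)).foldl
    (fun l i =>
      PySem.List.pySetD l i
        (let v := PySem.List.pyGetD l i 0 * 1
         if v > 9 then pvStrDigitSum v else v)) xs with hl1def
  obtain ⟨hl2, hp2⟩ := pvFoldSet upd2 _ (fun l i => rfl)
    (PySem.List.pyRange (PySem.List.len l1 - 2) (-1) (-2)) l1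
    (by intro i hi; rw [PySem.List.len_eq] at hi; rw [(pvMemRange _ _)] at hi; omega)
    (pvNodupRange _)
  apply List.ext_getElem?
  intro j
  by_cases hj : j < xs.length
  · rw [hp2 j (by omega)]
    have hjget : l1[j]? = some (if (j : Int) ∈ PySem.List.pyRange (PySem.List.len xs - 1) (-1) (-2)
        then upd1 xs[j] else xs[j]) := hp1 j hj
    have hl1j : l1[j]'(by omega) = (if (j : Int) ∈ PySem.List.pyRange (PySem.List.len xs - 1) (-1) (-2)
        then upd1 xs[j] else xs[j]) := by
      rw [List.getElem?_eq_getElem (by omega : j < l1.length)] at hjget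
      exact Option.some.inj hjget
    -- right-hand side
    rw [List.getElem?_map, PySem.List.getElem?_enumerate,
        List.getElem?_eq_getElem hj]
    simp only [Option.map_some]
    congr 1
    rw [hl1j]
    simp only [pvMemRange, PySem.List.len_eq, hl1, ← hn]
    rw [PySem.Int.mod_eq_emod_of_pos (by norm_num)]
    have hx : (0 : Int) + (j : Int) = (j : Int) := by ring
    by_cases hpar : (n - 1 - (j : Int)) % 2 = 1
    · have h2 : ¬ (0 ≤ (j:Int) ∧ (j:Int) ≤ n - 1 ∧ (n - 1 - (j:Int)) % 2 = 0) := by omega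
      have h3 : 0 ≤ (j:Int) ∧ (j:Int) ≤ n - 2 ∧ (n - 2 - (j:Int)) % 2 = 0 := by omega
      rw [if_neg h2, if_pos h3]
      simp only [hx, hpar, hupd2, beq_self_eq_true, if_true]
      by_cases hv : xs[j] * 2 > 9
      · rw [if_pos hv, if_pos hv, pvStrDigitSum_eq _ hv]
      · rw [if_neg hv, if_neg hv]
    · have h2 : 0 ≤ (j:Int) ∧ (j:Int) ≤ n - 1 ∧ (n - 1 - (j:Int)) % 2 = 0 := by omega
      have h3 : ¬ (0 ≤ (j:Int) ∧ (j:Int) ≤ n - 2 ∧ (n - 2 - (j:Int)) % 2 = 0) := by omega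
      rw [if_pos h2, if_neg h3]
      have hbne : ((n - 1 - ((0:Int) + (j:Int))) % 2 == 1) = false := by
        rw [hx]; exact beq_eq_false_iff_ne.mpr hpar
      simp only [hbne, Bool.false_eq_true, if_false, hupd1, mul_one]
      by_cases hv : xs[j] > 9
      · rw [if_pos hv, if_pos hv, pvStrDigitSum_eq _ hv]
      · rw [if_neg hv, if_neg hv]
  · rw [List.getElem?_eq_none (by rw [hl2, hl1]; omega),
        List.getElem?_eq_none (by rw [List.length_map, PySem.List.length_enumerate]; omega)]
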